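-- pv_equiv track=rewrite | github.com/d-us-vb/toys | snake/snake.py | build_buffer
-- ===== SOURCE A (Python) =====
-- height = 40
--
-- width = 40
--
-- ascart = ('┛', '┗', '┃', '━', '┏', '┓', '▉', '▲')
--
-- top_row = '\n' + ascart[4] + ascart[3] * width + ascart[5] + '\n'
--
-- bottom_row = ascart[1] + ascart[3] * width + ascart[0]
--
-- apple_position = [20, 20]
--
-- def build_buffer(position):
-- 	screen = top_row
-- 	for j in range(height):
-- 		screen += ascart[2]
-- 		for i in range(width):
-- 			if [i, j] in position:
-- 				screen += ascart[6]
-- 			elif [i, j] == apple_position: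
-- 				screen += ascart[7]
-- 			else:
-- 				screen += ' '
-- 		screen += ascart[2] + '\n'
-- 	screen += bottom_row
-- 	return screen
-- ===== SOURCE B (Python) =====
-- height = 40
--
-- width = 40
--
-- ascart = ('┛', '┗', '┃', '━', '┏', '┓', '▉', '▲')
--
-- top_row = '\n' + ascart[4] + ascart[3] * width + ascart[5] + '\n'
--
-- bottom_row = ascart[1] + ascart[3] * width + ascart[0]
--
-- apple_position = [20, 20]
--
-- def build_buffer(position):
-- 	grid = [[' '] * width for _ in range(height)]
-- 	ax, ay = apple_position
-- 	grid[ay][ax] = ascart[7]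
-- 	for p in position:
-- 		if len(p) == 2 and 0 <= p[0] < width and 0 <= p[1] < height:
-- 			grid[p[1]][p[0]] = ascart[6]
-- 	return top_row + ''.join(ascart[2] + ''.join(row) + ascart[2] + '\n' for row in grid) + bottom_row
-- ===== Notes on version B (the rewrite author's own statement) =====
-- stated objective: faster
-- what changed: Instead of membership-testing every screen cell against the position list, B allocates a height x width grid of spaces, places the apple glyph, marks each in-range snake segment directly into the grid, and joins the rows with the border strings.
import Mathlib
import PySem

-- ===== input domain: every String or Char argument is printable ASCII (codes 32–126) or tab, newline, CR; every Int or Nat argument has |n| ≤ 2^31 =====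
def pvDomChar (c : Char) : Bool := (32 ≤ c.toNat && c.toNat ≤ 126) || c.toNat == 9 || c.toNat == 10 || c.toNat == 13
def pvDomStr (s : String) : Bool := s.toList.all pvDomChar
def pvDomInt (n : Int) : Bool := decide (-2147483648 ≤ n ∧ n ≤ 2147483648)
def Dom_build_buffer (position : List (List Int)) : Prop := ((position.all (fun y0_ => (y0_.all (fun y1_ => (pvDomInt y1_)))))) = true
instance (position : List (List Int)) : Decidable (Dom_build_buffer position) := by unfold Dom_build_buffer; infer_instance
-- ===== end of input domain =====

-- B replaces A's per-cell membership scan of `position` by filling a 40×40 grid once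
-- (apple first, then each in-range snake cell) and joining the rows: objective = faster.

-- ===== PORT A =====
-- module constants of snake.py
def pv_top_row : String := "\n" ++ "┏" ++ String.ofList (List.replicate 40 '━') ++ "┓" ++ "\n"
def pv_bottom_row : String := "┗" ++ String.ofList (List.replicate 40 '━') ++ "┛"

def build_buffer (position : List (List Int)) : String :=
  ((PySem.List.pyRange 0 40 1).foldl (fun screen j =>
      ((PySem.List.pyRange 0 40 1).foldl (fun screen i =>
          if [i, j] ∈ position then screen ++ "▉"
          else if [i, j] = ([20, 20] : List Int) then screen ++ "▲"
          else screen ++ " ")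
        (screen ++ "┃")) ++ ("┃" ++ "\n"))
    pv_top_row) ++ pv_bottom_row

-- ===== PORT B =====
-- `if len(p) == 2 and 0 <= p[0] < width and 0 <= p[1] < height: grid[p[1]][p[0]] = '▉'`
def bb_set (g : List (List Char)) (p : List Int) : List (List Char) :=
  match p with
  | [x, y] =>
      if 0 ≤ x ∧ x < 40 ∧ 0 ≤ y ∧ y < 40 then
        g.modify y.toNat (fun row => row.set x.toNat '▉')
      else g
  | _ => g

def build_buffer_alt (position : List (List Int)) : String :=
  pv_top_row
    ++ PySem.Str.join ""
        ((position.foldl bb_set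
            ((List.replicate 40 (List.replicate 40 ' ')).modify 20 (fun row => row.set 20 '▲'))).map
          (fun row => "┃" ++ String.ofList row ++ ("┃" ++ "\n")))
    ++ pv_bottom_row

-- ===== PRECONDITION & SPEC =====
def Spec_build_buffer (position : List (List Int)) (out : String) : Prop := out = build_buffer_alt position
instance (position : List (List Int)) (out : String) : Decidable (Spec_build_buffer position out) := by unfold Spec_build_buffer; infer_instance

-- ===== CLAIM (what is proved, stated in full; the proofs are below) =====
def Claim_equal_build_buffer : Prop := ∀ (position : List (List Int)), Dom_build_buffer position → Spec_build_buffer position (build_buffer position)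

-- ===== LEMMAS AND PROOFS =====

/-- the character A prints at cell (i, j) -/
def cellChar (position : List (List Int)) (i j : Int) : Char :=
  if [i, j] ∈ position then '▉'
  else if [i, j] = ([20, 20] : List Int) then '▲'
  else ' '

/-- a 40×40 grid whose (j, i) entry is f i j -/
def gridOf (f : Nat → Nat → Char) : List (List Char) :=
  (List.range 40).map (fun j => (List.range 40).map (fun i => f i j))

theorem join_empty (parts : List (List Char)) : PySem.Chars.join [] parts = parts.flatten := by
  show List.intercalate [] parts = parts.flatten
  induction parts with
  | nil => rfl
  | cons a l ih =>
    cases l with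
    | nil => simp [List.intercalate]
    | cons b m =>
      simp only [List.intercalate, List.intersperse, List.flatten] at *
      simpa using ih

theorem join_cons (a : String) (l : List String) :
    PySem.Str.join "" (a :: l) = a ++ PySem.Str.join "" l := by
  apply String.toList_inj.mp
  rw [PySem.Str.toList_join, String.toList_append, PySem.Str.toList_join, List.map_cons,
      show ("" : String).toList = ([] : List Char) from rfl, join_empty, join_empty]
  rfl

theorem strfold (f : Int → String) (l : List Int) (s : String) :
    l.foldl (fun s i => s ++ f i) s = s ++ PySem.Str.join "" (l.map f) := by
  induction l generalizing s with
  | nil =>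
    apply String.toList_inj.mp
    simp [PySem.Str.toList_join, String.toList_append]
  | cons a l ih =>
    rw [List.foldl_cons, ih, List.map_cons, join_cons, String.append_assoc]

theorem join_singletons (g : Int → Char) (l : List Int) :
    PySem.Str.join "" (l.map (fun i => String.ofList [g i])) = String.ofList (l.map g) := by
  apply String.toList_inj.mp
  simp only [PySem.Str.toList_join, List.map_map, Function.comp_def]
  rw [show ("" : String).toList = [] from rfl, join_empty]
  induction l with
  | nil => simp
  | cons a l ih => simp at *; exact ih

theorem gridOf_congr {f f' : Nat → Nat → Char}
    (h : ∀ i j, i < 40 → j < 40 → f i j = f' i j) : gridOf f = gridOf f' := by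
  unfold gridOf
  refine List.map_congr_left (fun j hj => ?_)
  exact List.map_congr_left (fun i hi => h i j (List.mem_range.mp hi) (List.mem_range.mp hj))

theorem bb_set_gridOf (f : Nat → Nat → Char) (p : List Int) :
    bb_set (gridOf f) p
      = gridOf (fun i j => if p = [((i : Nat) : Int), ((j : Nat) : Int)] then '▉' else f i j) := by
  match p with
  | [] => exact gridOf_congr (by intro i j _ _; simp)
  | [x] => exact gridOf_congr (by intro i j _ _; simp)
  | x :: y :: z :: t => exact gridOf_congr (by intro i j _ _; simp)
  | [x, y] =>
    by_cases h : 0 ≤ x ∧ x < 40 ∧ 0 ≤ y ∧ y < 40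
    · simp only [bb_set, if_pos h]
      apply List.ext_getElem
      · simp [gridOf]
      · intro j hj hj'
        have hj40 : j < 40 := by simpa [gridOf] using hj
        rw [List.getElem_modify]
        simp only [gridOf, List.getElem_map, List.getElem_range]
        by_cases hjy : y.toNat = j
        · simp only [if_pos hjy]
          apply List.ext_getElem
          · simp
          · intro i hi hi'
            have hi40 : i < 40 := by simpa using hi
            rw [List.getElem_set]
            simp only [List.getElem_map, List.getElem_range]
            have hcond : ([x, y] = [((i : Nat) : Int), ((j : Nat) : Int)]) ↔ (x.toNat = i ∧ y.toNat = j) := by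
              constructor
              · intro he; simp only [List.cons.injEq, and_true] at he; omega
              · intro he; simp only [List.cons.injEq, and_true]; omega
            by_cases hix : x.toNat = i
            · rw [if_pos hix, if_pos (hcond.mpr ⟨hix, hjy⟩)]
            · rw [if_neg hix, if_neg (fun hc => hix (hcond.mp hc).1)]
        · simp only [if_neg hjy]
          apply List.ext_getElem
          · simp
          · intro i hi hi'
            simp only [List.getElem_map, List.getElem_range]
            rw [if_neg (fun hc => by
              simp only [List.cons.injEq, and_true] at hc
              exact hjy (by omega))]
    · simp only [bb_set, if_neg h]
      refine gridOf_congr (fun i j hi hj => ?_)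
      rw [if_neg (fun hc => by
        simp only [List.cons.injEq, and_true] at hc
        exact h (by omega))]

theorem foldl_bb_set (pos : List (List Int)) (f : Nat → Nat → Char) :
    pos.foldl bb_set (gridOf f)
      = gridOf (fun i j => if [((i : Nat) : Int), ((j : Nat) : Int)] ∈ pos then '▉' else f i j) := by
  induction pos generalizing f with
  | nil => exact gridOf_congr (by intro i j _ _; simp)
  | cons p rest ih =>
    rw [List.foldl_cons, bb_set_gridOf, ih]
    refine gridOf_congr (fun i j _ _ => ?_)
    by_cases h1 : [((i : Nat) : Int), ((j : Nat) : Int)] ∈ rest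
    · simp [h1]
    · by_cases h2 : p = [((i : Nat) : Int), ((j : Nat) : Int)] <;> simp [h1, h2, List.mem_cons, eq_comm]

theorem g1_eq : (List.replicate 40 (List.replicate 40 ' ') : List (List Char)).modify 20
      (fun row => row.set 20 '▲')
    = gridOf (fun i j => if i = 20 ∧ j = 20 then '▲' else ' ') := by
  decide

theorem cellChar_cast (position : List (List Int)) (i j : Nat) :
    cellChar position ((i : Nat) : Int) ((j : Nat) : Int)
      = (if [((i : Nat) : Int), ((j : Nat) : Int)] ∈ position then '▉'
         else if i = 20 ∧ j = 20 then '▲' else ' ') := by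
  unfold cellChar
  by_cases hm : [((i : Nat) : Int), ((j : Nat) : Int)] ∈ position
  · simp [hm]
  · have h2 : (((i : Nat) : Int) = 20 ∧ ((j : Nat) : Int) = 20) ↔ (i = 20 ∧ j = 20) := by omega
    simp [hm, h2]

theorem hrange : PySem.List.pyRange 0 40 1 = (List.range 40).map (fun (k : Nat) => (k : Int)) := by
  decide

theorem build_buffer_eq (position : List (List Int)) :
    build_buffer position
      = pv_top_row
        ++ PySem.Str.join "" ((List.range 40).map (fun j =>
            "┃" ++ String.ofList ((List.range 40).map
                      (fun i => cellChar position ((i : Nat) : Int) ((j : Nat) : Int)))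
              ++ ("┃" ++ "\n")))
        ++ pv_bottom_row := by
  unfold build_buffer
  have houter : (fun (screen : String) (j : Int) =>
      ((PySem.List.pyRange 0 40 1).foldl (fun screen i =>
          if [i, j] ∈ position then screen ++ "▉"
          else if [i, j] = ([20, 20] : List Int) then screen ++ "▲"
          else screen ++ " ")
        (screen ++ "┃")) ++ ("┃" ++ "\n"))
      = fun screen j => screen ++
          ("┃" ++ String.ofList ((PySem.List.pyRange 0 40 1).map (fun i => cellChar position i j))
            ++ ("┃" ++ "\n")) := by
    funext screen j
    have hfn : (fun (screen : String) (i : Int) =>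
        if [i, j] ∈ position then screen ++ "▉"
        else if [i, j] = ([20, 20] : List Int) then screen ++ "▲"
        else screen ++ " ")
      = fun screen i => screen ++ String.ofList [cellChar position i j] := by
      funext screen i
      unfold cellChar
      split_ifs <;> rfl
    rw [hfn, strfold (fun i => String.ofList [cellChar position i j]),
        join_singletons (fun i => cellChar position i j)]
    simp [String.append_assoc]
  rw [houter, strfold, hrange]
  simp only [List.map_map, Function.comp_def]

-- ===== VERDICT (by name: the statement is the Claim_ definition above) =====
theorem build_buffer_spec : Claim_equal_build_buffer := by
  intro position _
  unfold Spec_build_buffer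
  rw [build_buffer_eq]
  unfold build_buffer_alt
  rw [g1_eq, foldl_bb_set]
  unfold gridOf
  rw [List.map_map]
  refine congrArg (fun z => pv_top_row ++ PySem.Str.join "" z ++ pv_bottom_row) ?_
  refine List.map_congr_left (fun j _ => ?_)
  simp only [Function.comp_def]
  congr 2
  exact congrArg String.ofList (List.map_congr_left (fun i _ => cellChar_cast position i j))
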